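-- pv_equiv track=rewrite | github.com/kurosiro2/n-gram | statistics/range/week_group.py | collect_group_order
-- ===== SOURCE A (Python) =====
-- def collect_group_order(group_timeline):
--     """
--     タイムラインから出てくるグループ名を集めて、
--     All を先頭, Unknown を最後にした順序で返す。
--     """
--     groups = set()
--     for snaps in group_timeline.values():
--         for _, gset in snaps:
--             groups.update(gset)
--
--     groups.add("All")
--     groups.add("Unknown")
--
--     def key(g):
--         if g == "All":
--             return (0, "")
--         if g == "Unknown":
--             return (2, "")
--         return (1, g.lower())
--
--     return sorted(groups, key=key)
-- ===== SOURCE B (Python) =====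
-- def collect_group_order(group_timeline):
--     """
--     タイムラインから出てくるグループ名を集めて、
--     All を先頭, Unknown を最後にした順序で返す。
--     """
--     middle = []
--     seen = set()
--     for snaps in group_timeline.values():
--         for _, gset in snaps:
--             for g in gset:
--                 if g in seen or g == "All" or g == "Unknown":
--                     continue
--                 seen.add(g)
--                 i = 0
--                 while i < len(middle) and middle[i].lower() < g.lower():
--                     i += 1
--                 middle.insert(i, g)
--     return ["All"] + middle + ["Unknown"]
-- ===== Notes on version B (the rewrite author's own statement) =====
-- stated objective: alternative
-- what changed: B never builds the full name set and never calls sorted(): it keeps the middle part as an always-sorted list and, in a single traversal, inserts each not-yet-seen non-sentinel name at its case-insensitive position (online insertion sort), then wraps it in the All/Unknown sentinels.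
import Mathlib
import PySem

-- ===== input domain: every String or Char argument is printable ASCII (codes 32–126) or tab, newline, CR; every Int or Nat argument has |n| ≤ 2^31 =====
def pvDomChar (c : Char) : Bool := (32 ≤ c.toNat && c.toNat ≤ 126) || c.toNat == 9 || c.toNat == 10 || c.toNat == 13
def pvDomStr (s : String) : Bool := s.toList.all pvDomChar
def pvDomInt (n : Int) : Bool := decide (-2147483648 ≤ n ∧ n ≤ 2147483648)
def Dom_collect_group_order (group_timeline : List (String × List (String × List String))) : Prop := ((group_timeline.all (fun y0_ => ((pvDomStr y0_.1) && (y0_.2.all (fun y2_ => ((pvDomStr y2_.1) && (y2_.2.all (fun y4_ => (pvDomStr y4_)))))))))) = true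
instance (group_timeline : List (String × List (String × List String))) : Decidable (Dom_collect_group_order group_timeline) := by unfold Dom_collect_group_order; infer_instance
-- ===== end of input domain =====

-- B replaces A's collect-into-a-set-then-sort-with-a-sentinel-tuple-key by an online
-- insertion sort: one traversal inserts each new non-sentinel name at its
-- case-insensitive place in an always-sorted list, wrapped in the two sentinels
-- (objective: alternative).
-- ===== PORT A =====
def cgoKey1 (g : String) : Int :=
  if g = "All" then 0
  else if g = "Unknown" then 2
  else 1

def cgoKey2 (g : String) : String :=
  if g = "All" then ""
  else if g = "Unknown" then ""
  else PySem.Str.lower g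

def collect_group_order (group_timeline : List (String × List (String × List String))) : List String :=
  let groups : PySem.Set String :=
    group_timeline.foldl
      (fun groups p => p.2.foldl (fun groups q => PySem.Set.update groups q.2) groups)
      PySem.Set.empty
  let groups := PySem.Set.add groups "All"
  let groups := PySem.Set.add groups "Unknown"
  PySem.List.sorted2 groups cgoKey1 cgoKey2

-- ===== PORT B =====
-- the while-loop/insert of Source B: insert g before the first element whose lower is not < lower g
def cgoInsert (middle : List String) (g : String) : List String :=
  match middle with
  | [] => [g]
  | h :: t =>
    if PySem.Str.lower h < PySem.Str.lower g then h :: cgoInsert t g else g :: h :: t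

-- the body of Source B's innermost loop (state = (seen, middle))
def cgoStep (st : PySem.Set String × List String) (g : String) :
    PySem.Set String × List String :=
  if g ∈ st.1 ∨ g = "All" ∨ g = "Unknown" then st
  else (PySem.Set.add st.1 g, cgoInsert st.2 g)

def collect_group_order_alt (group_timeline : List (String × List (String × List String))) : List String :=
  let st :=
    group_timeline.foldl
      (fun st p => p.2.foldl (fun st q => q.2.foldl cgoStep st) st)
      (PySem.Set.empty, [])
  "All" :: st.2 ++ ["Unknown"]

-- ===== PRECONDITION & SPEC =====
-- every group name occurring anywhere in the timeline
def cgoAllGroups (group_timeline : List (String × List (String × List String))) : List String :=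
  group_timeline.flatMap (fun p => p.2.flatMap (fun q => q.2))

-- Pre_ excludes timelines containing two distinct non-sentinel group names equal
-- case-insensitively: there Python's sort order among the tied names is the set's
-- hash-iteration order (randomised per run), which is not portable.
def Pre_collect_group_order (group_timeline : List (String × List (String × List String))) : Prop :=
  ∀ g1 ∈ cgoAllGroups group_timeline, ∀ g2 ∈ cgoAllGroups group_timeline,
    g1 ≠ "All" → g1 ≠ "Unknown" → g2 ≠ "All" → g2 ≠ "Unknown" →
    PySem.Str.lower g1 = PySem.Str.lower g2 → g1 = g2
instance (group_timeline : List (String × List (String × List String))) : Decidable (Pre_collect_group_order group_timeline) := by unfold Pre_collect_group_order; infer_instance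

def pvWitness_collect_group_order : (List (String × List (String × List String))) :=
  [("2024-W01", [("mon", ["Beta", "alpha", "All"])])]

def Spec_collect_group_order (group_timeline : List (String × List (String × List String))) (out : List String) : Prop := out = collect_group_order_alt group_timeline
instance (group_timeline : List (String × List (String × List String))) (out : List String) : Decidable (Spec_collect_group_order group_timeline out) := by unfold Spec_collect_group_order; infer_instance

-- ===== CLAIM (what is proved, stated in full; the proofs are below) =====
def Claim_equal_collect_group_order : Prop := ∀ (group_timeline : List (String × List (String × List String))), Dom_collect_group_order group_timeline → Pre_collect_group_order group_timeline → Spec_collect_group_order group_timeline (collect_group_order group_timeline)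

-- ===== LEMMAS AND PROOFS =====

-- the lexicographic key A's tuple key denotes
def cgoKey (g : String) : Lex (Int × String) := toLex (cgoKey1 g, cgoKey2 g)

-- sorted2 with keys (k1, k2) is sorted with the lexicographic key
theorem cgo_sorted2_eq_sorted_lex {α : Type} (xs : List α) (k1 : α → Int) (k2 : α → String) :
    PySem.List.sorted2 xs k1 k2 = PySem.List.sorted xs (fun x => toLex (k1 x, k2 x)) := by
  unfold PySem.List.sorted2 PySem.List.sorted
  have h : (fun a b => decide (k1 a < k1 b) || (!decide (k1 b < k1 a) && decide (k2 a < k2 b)))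
      = (fun a b => decide ((fun x => toLex (k1 x, k2 x)) a < (fun x => toLex (k1 x, k2 x)) b)) := by
    funext a b
    rw [Bool.eq_iff_iff]
    simp only [Bool.or_eq_true, Bool.and_eq_true, Bool.not_eq_true', decide_eq_true_eq,
      decide_eq_false_iff_not, Prod.Lex.lt_iff, ofLex_toLex]
    constructor
    · rintro (h1 | ⟨h1, h2⟩)
      · exact Or.inl h1
      · rcases lt_trichotomy (k1 a) (k1 b) with h' | h' | h'
        · exact Or.inl h'
        · exact Or.inr ⟨h', h2⟩
        · exact absurd h' h1
    · rintro (h1 | ⟨h1, h2⟩)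
      · exact Or.inl h1
      · exact Or.inr ⟨by simp [h1], h2⟩
  simp only [Bool.false_eq_true, if_false]
  rw [h]

-- A's set-building loop builds set(cgoAllGroups gt)
theorem cgo_inner_fold (l : List (String × List String)) (s : PySem.Set String) :
    l.foldl (fun s q => PySem.Set.update s q.2) s
      = (l.flatMap (fun q => q.2)).foldl PySem.Set.add s := by
  induction l generalizing s with
  | nil => rfl
  | cons q t ih =>
    rw [List.foldl_cons, ih, List.flatMap_cons, List.foldl_append]
    rfl

theorem cgo_foldA (gt : List (String × List (String × List String))) (s : PySem.Set String) :
    gt.foldl (fun s p => p.2.foldl (fun s q => PySem.Set.update s q.2) s) s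
      = (cgoAllGroups gt).foldl PySem.Set.add s := by
  induction gt generalizing s with
  | nil => rfl
  | cons p t ih =>
    simp only [cgoAllGroups, List.flatMap_cons, List.foldl_cons, List.foldl_append] at ih ⊢
    rw [ih, cgo_inner_fold]

-- B's triple loop is the fold of cgoStep over the flattened name list
theorem cgo_inner_foldB (l : List (String × List String)) (st : PySem.Set String × List String) :
    l.foldl (fun st q => q.2.foldl cgoStep st) st
      = (l.flatMap (fun q => q.2)).foldl cgoStep st := by
  induction l generalizing st with
  | nil => rfl
  | cons q t ih =>
    rw [List.foldl_cons, ih, List.flatMap_cons, List.foldl_append]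

theorem cgo_foldB (gt : List (String × List (String × List String)))
    (st : PySem.Set String × List String) :
    gt.foldl (fun st p => p.2.foldl (fun st q => q.2.foldl cgoStep st) st) st
      = (cgoAllGroups gt).foldl cgoStep st := by
  induction gt generalizing st with
  | nil => rfl
  | cons p t ih =>
    simp only [cgoAllGroups, List.flatMap_cons, List.foldl_cons, List.foldl_append] at ih ⊢
    rw [ih, cgo_inner_foldB]

-- membership in cgoInsert
theorem cgo_mem_insert (l : List String) (g x : String) :
    x ∈ cgoInsert l g ↔ x = g ∨ x ∈ l := by
  induction l with
  | nil => simp [cgoInsert]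
  | cons h t ih =>
    unfold cgoInsert
    split_ifs with hlt
    · simp only [List.mem_cons, ih]
      tauto
    · simp only [List.mem_cons]

theorem cgo_nodup_insert (l : List String) (g : String) (hnd : l.Nodup) (hg : g ∉ l) :
    (cgoInsert l g).Nodup := by
  induction l with
  | nil => simp [cgoInsert]
  | cons h t ih =>
    rcases List.nodup_cons.mp hnd with ⟨hht, hnt⟩
    unfold cgoInsert
    split_ifs with hlt
    · refine List.nodup_cons.mpr ⟨?_, ih hnt (fun hm => hg (List.mem_cons_of_mem _ hm))⟩
      rw [cgo_mem_insert]
      rintro (rfl | hm)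
      · exact hg List.mem_cons_self
      · exact hht hm
    · exact List.nodup_cons.mpr ⟨hg, hnd⟩

theorem cgo_pairwise_insert (l : List String) (g : String)
    (hpw : l.Pairwise (fun a b => PySem.Str.lower a ≤ PySem.Str.lower b)) :
    (cgoInsert l g).Pairwise (fun a b => PySem.Str.lower a ≤ PySem.Str.lower b) := by
  induction l with
  | nil => simp [cgoInsert]
  | cons h t ih =>
    rcases List.pairwise_cons.mp hpw with ⟨hht, hpt⟩
    unfold cgoInsert
    split_ifs with hlt
    · refine List.pairwise_cons.mpr ⟨?_, ih hpt⟩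
      intro x hx
      rcases (cgo_mem_insert t g x).mp hx with rfl | hm
      · exact le_of_lt hlt
      · exact hht x hm
    · refine List.pairwise_cons.mpr ⟨?_, hpw⟩
      intro x hx
      rcases List.mem_cons.mp hx with rfl | hm
      · exact le_of_not_gt hlt
      · exact le_trans (le_of_not_gt hlt) (hht x hm)

-- the loop invariant of Source B's traversal
theorem cgo_step_invariant (gs : List String) (seen : PySem.Set String) (mid : List String)
    (hmem : ∀ x, x ∈ mid ↔ (x ∈ seen ∧ x ≠ "All" ∧ x ≠ "Unknown"))
    (hnd : mid.Nodup)
    (hpw : mid.Pairwise (fun a b => PySem.Str.lower a ≤ PySem.Str.lower b)) :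
    (∀ x, x ∈ (gs.foldl cgoStep (seen, mid)).1 ↔
        (x ∈ seen ∨ (x ∈ gs ∧ x ≠ "All" ∧ x ≠ "Unknown"))) ∧
    (∀ x, x ∈ (gs.foldl cgoStep (seen, mid)).2 ↔
        (x ∈ (gs.foldl cgoStep (seen, mid)).1 ∧ x ≠ "All" ∧ x ≠ "Unknown")) ∧
    (gs.foldl cgoStep (seen, mid)).2.Nodup ∧
    (gs.foldl cgoStep (seen, mid)).2.Pairwise
      (fun a b => PySem.Str.lower a ≤ PySem.Str.lower b) := by
  induction gs generalizing seen mid with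
  | nil =>
    refine ⟨fun x => by simp, hmem, hnd, hpw⟩
  | cons g gs ih =>
    rw [List.foldl_cons]
    by_cases hc : g ∈ seen ∨ g = "All" ∨ g = "Unknown"
    · rw [show cgoStep (seen, mid) g = (seen, mid) from by simp [cgoStep, hc]]
      obtain ⟨h1, h2, h3, h4⟩ := ih seen mid hmem hnd hpw
      refine ⟨?_, h2, h3, h4⟩
      intro x
      rw [h1]
      simp only [List.mem_cons]
      constructor
      · rintro (hs | ⟨hm, hA, hU⟩)
        · exact Or.inl hs
        · exact Or.inr ⟨Or.inr hm, hA, hU⟩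
      · rintro (hs | ⟨rfl | hm, hA, hU⟩)
        · exact Or.inl hs
        · rcases hc with hs | rfl | rfl
          · exact Or.inl hs
          · exact absurd rfl hA
          · exact absurd rfl hU
        · exact Or.inr ⟨hm, hA, hU⟩
    · rw [show cgoStep (seen, mid) g = (PySem.Set.add seen g, cgoInsert mid g) from by
        simp [cgoStep, hc]]
      push_neg at hc
      obtain ⟨hgs, hgA, hgU⟩ := hc
      have hgmid : g ∉ mid := fun hm => hgs ((hmem g).mp hm).1
      have hmem' : ∀ x, x ∈ cgoInsert mid g ↔
          (x ∈ PySem.Set.add seen g ∧ x ≠ "All" ∧ x ≠ "Unknown") := by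
        intro x
        rw [cgo_mem_insert, hmem, PySem.Set.mem_add]
        constructor
        · rintro (rfl | ⟨hs, hA, hU⟩)
          · exact ⟨Or.inr rfl, hgA, hgU⟩
          · exact ⟨Or.inl hs, hA, hU⟩
        · rintro ⟨hs | rfl, hA, hU⟩
          · exact Or.inr ⟨hs, hA, hU⟩
          · exact Or.inl rfl
      obtain ⟨h1, h2, h3, h4⟩ := ih (PySem.Set.add seen g) (cgoInsert mid g) hmem'
        (cgo_nodup_insert mid g hnd hgmid) (cgo_pairwise_insert mid g hpw)
      refine ⟨?_, h2, h3, h4⟩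
      intro x
      rw [h1, PySem.Set.mem_add]
      simp only [List.mem_cons]
      constructor
      · rintro ((hs | rfl) | ⟨hm, hA, hU⟩)
        · exact Or.inl hs
        · exact Or.inr ⟨Or.inl rfl, hgA, hgU⟩
        · exact Or.inr ⟨Or.inr hm, hA, hU⟩
      · rintro (hs | ⟨rfl | hm, hA, hU⟩)
        · exact Or.inl (Or.inl hs)
        · exact Or.inl (Or.inr rfl)
        · exact Or.inr ⟨hm, hA, hU⟩

-- ===== VERDICT (by name: the statement is the Claim_ definition above) =====
theorem collect_group_order_spec : Claim_equal_collect_group_order := by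
  intro gt _dom pre
  unfold Spec_collect_group_order collect_group_order collect_group_order_alt
  set S : PySem.Set String := PySem.Set.ofList (cgoAllGroups gt) with hSdef
  have hA : gt.foldl (fun s p => p.2.foldl (fun s q => PySem.Set.update s q.2) s) PySem.Set.empty = S := by
    rw [cgo_foldA]; rfl
  rw [hA, cgo_foldB]
  obtain ⟨hSeen, hMmemRaw, hMnodup, hMle⟩ :=
    cgo_step_invariant (cgoAllGroups gt) PySem.Set.empty []
      (fun x => by simp [PySem.Set.empty]) List.nodup_nil List.Pairwise.nil
  set st := (cgoAllGroups gt).foldl cgoStep (PySem.Set.empty, []) with hst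
  set M : List String := st.2 with hM
  have hSmem : ∀ x, x ∈ S ↔ x ∈ cgoAllGroups gt := fun x => PySem.Set.mem_ofList _ x
  have hSnodup : S.Nodup := PySem.Set.nodup_ofList _
  have hMmem : ∀ x, x ∈ M ↔ x ∈ S ∧ x ≠ "All" ∧ x ≠ "Unknown" := by
    intro x
    rw [hM, hMmemRaw x, hSeen x, hSmem]
    simp [PySem.Set.empty]
  -- the target list
  set ys : List String := "All" :: M ++ ["Unknown"] with hys
  have hysnodup : ys.Nodup := by
    rw [hys]
    refine List.nodup_cons.mpr ⟨?_, ?_⟩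
    · intro h
      rcases List.mem_append.mp h with h | h
      · exact ((hMmem _).mp h).2.1 rfl
      · simp at h
    · refine List.nodup_append.mpr ⟨hMnodup, List.nodup_singleton _, ?_⟩
      intro a ha b hb hab
      simp at hb
      exact ((hMmem _).mp ha).2.2 (hab ▸ hb ▸ rfl)
  -- the sorted input
  set G : PySem.Set String := PySem.Set.add (PySem.Set.add S "All") "Unknown" with hG
  have hGnodup : G.Nodup := PySem.Set.nodup_add _ _ (PySem.Set.nodup_add _ _ hSnodup)
  have hGmem : ∀ x, x ∈ G ↔ x ∈ S ∨ x = "All" ∨ x = "Unknown" := by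
    intro x
    rw [hG, PySem.Set.mem_add, PySem.Set.mem_add]
    tauto
  have hperm : ys.Perm G := by
    rw [List.perm_ext_iff_of_nodup hysnodup hGnodup]
    intro a
    rw [hGmem]
    constructor
    · intro h
      rcases List.mem_cons.mp h with h | h
      · exact Or.inr (Or.inl h)
      · rcases List.mem_append.mp h with h | h
        · exact Or.inl ((hMmem _).mp h).1
        · simp at h; exact Or.inr (Or.inr h)
    · intro h
      rcases h with h | h | h
      · by_cases hA' : a = "All"
        · exact hA' ▸ List.mem_cons_self
        · by_cases hU : a = "Unknown"
          · subst hU; exact List.mem_cons_of_mem _ (List.mem_append_right _ (by simp))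
          · exact List.mem_cons_of_mem _
              (List.mem_append_left _ ((hMmem a).mpr ⟨h, hA', hU⟩))
      · exact h ▸ List.mem_cons_self
      · subst h; exact List.mem_cons_of_mem _ (List.mem_append_right _ (by simp))
  -- ys is strictly increasing under the lexicographic key
  have hkeyM : ∀ g ∈ M, cgoKey g = toLex ((1 : Int), PySem.Str.lower g) := by
    intro g hg
    rcases (hMmem g).mp hg with ⟨_, h1, h2⟩
    simp [cgoKey, cgoKey1, cgoKey2, h1, h2]
  have hMpair : M.Pairwise (fun a b => cgoKey a < cgoKey b) := by
    have hne : M.Pairwise (fun a b : String => a ≠ b) := hMnodup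
    refine (hMle.and hne).imp_of_mem ?_
    intro a b ha hb hab
    rcases (hMmem a).mp ha with ⟨haS, ha1, ha2⟩
    rcases (hMmem b).mp hb with ⟨hbS, hb1, hb2⟩
    have hlt : PySem.Str.lower a < PySem.Str.lower b := by
      rcases lt_or_eq_of_le hab.1 with h | h
      · exact h
      · exact absurd (pre a ((hSmem a).mp haS) b ((hSmem b).mp hbS) ha1 ha2 hb1 hb2 h) hab.2
    rw [hkeyM a ha, hkeyM b hb, Prod.Lex.lt_iff]
    exact Or.inr ⟨rfl, hlt⟩
  have hyspair : ys.Pairwise (fun a b => cgoKey a < cgoKey b) := by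
    rw [hys]
    refine List.pairwise_cons.mpr ⟨?_, ?_⟩
    · intro b hb
      have hkA : cgoKey "All" = toLex ((0 : Int), "") := by simp [cgoKey, cgoKey1, cgoKey2]
      rcases List.mem_append.mp hb with hb | hb
      · rw [hkA, hkeyM b hb, Prod.Lex.lt_iff]; exact Or.inl (by norm_num)
      · simp at hb; subst hb
        rw [hkA, show cgoKey "Unknown" = toLex ((2 : Int), "") by simp [cgoKey, cgoKey1, cgoKey2],
          Prod.Lex.lt_iff]
        exact Or.inl (by norm_num)
    · refine List.pairwise_append.mpr ⟨hMpair, List.pairwise_singleton _ _, ?_⟩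
      intro a ha b hb
      simp at hb; subst hb
      rw [hkeyM a ha, show cgoKey "Unknown" = toLex ((2 : Int), "") by simp [cgoKey, cgoKey1, cgoKey2],
        Prod.Lex.lt_iff]
      exact Or.inl (by norm_num)
  -- conclude
  rw [cgo_sorted2_eq_sorted_lex]
  exact PySem.List.sorted_eq_of_perm_of_pairwise_lt G ys
    (fun x => toLex (cgoKey1 x, cgoKey2 x)) hperm hyspair
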